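-- pv_equiv track=rewrite | github.com/sudipt-31/Natural-Language-to-Sql | test.py | prune_schema_for_question
-- ===== SOURCE A (Python) =====
-- def extract_keywords_from_question(question: str) -> set:
--     """Extract meaningful keywords from the question"""
--     # Remove common stop words and SQL-related terms
--     stop_words = {
--         'what', 'which', 'how', 'when', 'where', 'who', 'show', 'list', 'find',
--         'get', 'tell', 'give', 'the', 'a', 'an', 'in', 'on', 'at', 'to', 'for',
--         'of', 'with', 'by', 'from', 'up', 'about', 'into', 'over', 'after'
--     }
--
--     # Tokenize and clean the question
--     words = question.lower().split()
--     keywords = {word for word in words if word not in stop_words}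
--     return keywords
--
-- def calculate_table_relevance_scores(keywords: set, schema_info: dict) -> dict:
--     """Calculate relevance scores for each table based on keyword matches"""
--     relevance_scores = {}
--
--     for table_name, columns in schema_info.items():
--         score = 0
--         # Check table name matches
--         table_words = set(table_name.lower().split('_'))
--         score += len(keywords.intersection(table_words)) * 2  # Higher weight for table name matches
--
--         # Check column matches
--         column_words = set()
--         for col in columns:
--             col_words = set(col['name'].lower().split('_'))
--             column_words.update(col_words)
--
--         score += len(keywords.intersection(column_words))
--
--         # Store score if there's any match
--         if score > 0:
--             relevance_scores[table_name] = score
--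
--     return relevance_scores
--
-- def get_related_tables(table_name: str, schema_info: dict) -> set:
--     """Get related tables through foreign key relationships"""
--     related_tables = {table_name}
--
--     # Check foreign key relationships
--     for col in schema_info[table_name]:
--         if 'type' in col and 'FOREIGN KEY' in str(col['type']):
--             # Extract referenced table name from foreign key
--             referenced_table = col['type'].split('-> ')[1].split('.')[0]
--             related_tables.add(referenced_table)
--
--     return related_tables
--
-- def prune_schema_for_question(question: str, full_schema: dict) -> dict:
--     """Prune schema to only include relevant tables for the question"""
--     # Extract keywords from question
--     keywords = extract_keywords_from_question(question)
--
--     # Calculate relevance scores for tables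
--     relevance_scores = calculate_table_relevance_scores(keywords, full_schema)
--
--     # If no direct matches found, return full schema
--     if not relevance_scores:
--         return full_schema
--
--     # Get primary relevant tables and their related tables
--     relevant_tables = set()
--     for table in relevance_scores:
--         relevant_tables.update(get_related_tables(table, full_schema))
--
--     # Create pruned schema
--     pruned_schema = {
--         table: columns
--         for table, columns in full_schema.items()
--         if table in relevant_tables
--     }
--
--     return pruned_schema
-- ===== SOURCE B (Python) =====
-- def prune_schema_for_question(question: str, full_schema: dict) -> dict:
--     """Prune schema via an inverted index word -> tables: keyword lookups replace
--     A's per-table scoring/intersection pass entirely."""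
--     stop_words = {
--         'what', 'which', 'how', 'when', 'where', 'who', 'show', 'list', 'find',
--         'get', 'tell', 'give', 'the', 'a', 'an', 'in', 'on', 'at', 'to', 'for',
--         'of', 'with', 'by', 'from', 'up', 'about', 'into', 'over', 'after'
--     }
--     keywords = {w for w in question.lower().split() if w not in stop_words}
--
--     # Inverted index: word -> list of tables whose name or column names contain it
--     index = {}
--     for table, columns in full_schema.items():
--         words = set(table.lower().split('_'))
--         for col in columns:
--             words.update(col['name'].lower().split('_'))
--         for w in words:
--             index.setdefault(w, []).append(table)
--
--     # Primary relevant tables: union of index buckets of the question's keywords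
--     primary = set()
--     for w in keywords:
--         primary.update(index.get(w, []))
--
--     if not primary:
--         return full_schema
--
--     # Expand with foreign-key-referenced tables of the primary tables
--     keep = set(primary)
--     for table, columns in full_schema.items():
--         if table in primary:
--             for col in columns:
--                 if 'type' in col and 'FOREIGN KEY' in str(col['type']):
--                     keep.add(col['type'].split('-> ')[1].split('.')[0])
--
--     return {t: cols for t, cols in full_schema.items() if t in keep}
-- ===== Notes on version B (the rewrite author's own statement) =====
-- stated objective: alternative
-- what changed: B replaces A's per-table keyword-intersection scoring with an inverted index built once from the schema (word -> list of tables); relevant tables are found by looking each question keyword up in the index and uniting the buckets, then foreign-key targets of those tables are added and the schema filtered; Pre_ excludes inputs where A raises (a column without a 'name' key, a relevant FOREIGN KEY type without '-> ') and association lists with duplicate table or column-dict keys, which do not represent Python dicts.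
import Mathlib
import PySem

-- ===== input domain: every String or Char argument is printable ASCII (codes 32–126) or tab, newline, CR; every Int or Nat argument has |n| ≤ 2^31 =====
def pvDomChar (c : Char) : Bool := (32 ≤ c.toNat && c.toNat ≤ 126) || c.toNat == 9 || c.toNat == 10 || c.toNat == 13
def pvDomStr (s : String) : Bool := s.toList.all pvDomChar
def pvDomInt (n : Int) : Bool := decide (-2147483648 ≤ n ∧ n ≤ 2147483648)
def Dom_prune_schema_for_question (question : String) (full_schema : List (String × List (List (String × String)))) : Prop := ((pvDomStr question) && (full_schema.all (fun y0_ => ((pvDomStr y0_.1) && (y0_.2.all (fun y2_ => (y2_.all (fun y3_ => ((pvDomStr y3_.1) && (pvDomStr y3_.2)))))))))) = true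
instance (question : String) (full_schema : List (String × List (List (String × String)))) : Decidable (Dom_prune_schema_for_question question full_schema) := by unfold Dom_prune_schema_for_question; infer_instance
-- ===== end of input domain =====

-- B replaces A's per-table keyword-intersection scoring with an inverted index (word -> tables)
-- built once from the schema and queried per keyword; equal return values on Pre_ (duplicate-free
-- association lists on which the Python A returns normally).

-- Helpers shared verbatim by both Pythons (the stop-word set, the FK test
-- `'type' in col and 'FOREIGN KEY' in str(col['type'])`, and the FK-target parse
-- `col['type'].split('-> ')[1].split('.')[0]`):
def pvStopWords : List String :=
  ["what", "which", "how", "when", "where", "who", "show", "list", "find",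
   "get", "tell", "give", "the", "a", "an", "in", "on", "at", "to", "for",
   "of", "with", "by", "from", "up", "about", "into", "over", "after"]

-- s.split('_') (the separator is non-empty, so Python's str.split never raises: the [] default is unreachable)
def pvSplitUnd (s : String) : List String := (PySem.Str.split? s "_").getD []

-- the word set of one column dict: col['name'].lower().split('_')
-- (col['name'] is present on every input admitted by Pre_; Python raises KeyError otherwise)
def pvWordsOfName (col : List (String × String)) : List String :=
  pvSplitUnd (PySem.Str.lower (PySem.Dict.getD (PySem.Dict.mk col) "name" ""))

def pvIsFk (col : List (String × String)) : Bool :=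
  PySem.Dict.contains (PySem.Dict.mk col) "type" &&
    PySem.Str.isIn "FOREIGN KEY" (PySem.Dict.getD (PySem.Dict.mk col) "type" "")

-- `col['type'].split('-> ')[1].split('.')[0]`; split('-> ') has a second piece on every input
-- admitted by Pre_ (Python raises IndexError otherwise), split('.') is never empty, so the
-- [1]/[0] defaults are unreachable there.
def pvFkRef (col : List (String × String)) : String :=
  (((PySem.Str.split?
      ((PySem.List.pyGet? ((PySem.Str.split? (PySem.Dict.getD (PySem.Dict.mk col) "type" "") "-> ").getD []) 1).getD "")
      ".").getD []).headD "")

-- ===== PORT A =====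
def extract_keywords_from_question (question : String) : PySem.Set String :=
  PySem.Set.ofList
    ((PySem.Str.split₀ (PySem.Str.lower question)).filter (fun w => !(pvStopWords.contains w)))

-- body of A's scoring loop: 2 * table-name matches + column-name matches
-- (col['name'] is present on every input admitted by Pre_; Python raises KeyError otherwise)
def pvTableScore (keywords : PySem.Set String) (table_name : String) (columns : List (List (String × String))) : Int :=
  let table_words := PySem.Set.ofList (pvSplitUnd (PySem.Str.lower table_name))
  let score : Int := 0 + ((PySem.Set.inter keywords table_words).length : Int) * 2
  let column_words := columns.foldl
    (fun cw col => PySem.Set.update cw (pvWordsOfName col)) PySem.Set.empty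
  score + ((PySem.Set.inter keywords column_words).length : Int)

def calculate_table_relevance_scores (keywords : PySem.Set String) (schema_info : List (String × List (List (String × String)))) : PySem.Dict String Int :=
  schema_info.foldl
    (fun d tc =>
      if 0 < pvTableScore keywords tc.1 tc.2
      then PySem.Dict.insert d tc.1 (pvTableScore keywords tc.1 tc.2) else d)
    PySem.Dict.empty

-- schema_info[table_name]: only called with keys of schema_info, so the [] default is unreachable
def get_related_tables (table_name : String) (schema_info : List (String × List (List (String × String)))) : PySem.Set String :=
  (PySem.Dict.getD (PySem.Dict.mk schema_info) table_name []).foldl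
    (fun related col => if pvIsFk col then PySem.Set.add related (pvFkRef col) else related)
    (PySem.Set.add PySem.Set.empty table_name)

def prune_schema_for_question (question : String) (full_schema : List (String × List (List (String × String)))) : List (String × List (List (String × String))) :=
  let keywords := extract_keywords_from_question question
  let relevance_scores := calculate_table_relevance_scores keywords full_schema
  if relevance_scores.size == 0 then full_schema
  else
    let relevant_tables :=
      relevance_scores.keys.foldl
        (fun r table => PySem.Set.update r (get_related_tables table full_schema))
        PySem.Set.empty
    (full_schema.foldl
      (fun d p => if PySem.Set.contains relevant_tables p.1 then PySem.Dict.insert d p.1 p.2 else d)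
      PySem.Dict.empty).items

-- ===== PORT B =====
-- table-name words plus all column-name words, as one set (B's per-table `words`)
def pvTableWordsB (table : String) (columns : List (List (String × String))) : PySem.Set String :=
  columns.foldl
    (fun ws col => PySem.Set.update ws (pvWordsOfName col))
    (PySem.Set.ofList (pvSplitUnd (PySem.Str.lower table)))

-- one table's contribution to the inverted index: for w in words: index.setdefault(w, []).append(table)
-- (setdefault-then-append on a Python dict is exactly Dict.insert at key w of getD w [] ++ [table])
def pvIndexStep (d : PySem.Dict String (List String)) (p : String × List (List (String × String))) : PySem.Dict String (List String) :=
  (pvTableWordsB p.1 p.2).foldl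
    (fun d w => PySem.Dict.insert d w (PySem.Dict.getD d w [] ++ [p.1])) d

def pvIndexB (full_schema : List (String × List (List (String × String)))) : PySem.Dict String (List String) :=
  full_schema.foldl pvIndexStep PySem.Dict.empty

-- primary = union of the index buckets of the keywords
def pvPrimaryB (keywords : PySem.Set String) (full_schema : List (String × List (List (String × String)))) : PySem.Set String :=
  keywords.foldl
    (fun s w => PySem.Set.update s (PySem.Dict.getD (pvIndexB full_schema) w [])) PySem.Set.empty

-- B's inner column loop: add the FK targets of these columns to keep
def pvFkFold (s : PySem.Set String) (cols : List (List (String × String))) : PySem.Set String :=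
  cols.foldl (fun keep col => if pvIsFk col then PySem.Set.add keep (pvFkRef col) else keep) s

-- keep = set(primary) plus the FK targets of columns of primary tables
def pvKeepB (primary : PySem.Set String) (full_schema : List (String × List (List (String × String)))) : PySem.Set String :=
  full_schema.foldl
    (fun keep p =>
      if PySem.Set.contains primary p.1 then pvFkFold keep p.2
      else keep)
    primary

def prune_schema_for_question_alt (question : String) (full_schema : List (String × List (List (String × String)))) : List (String × List (List (String × String))) :=
  let keywords : PySem.Set String :=
    PySem.Set.ofList
      ((PySem.Str.split₀ (PySem.Str.lower question)).filter (fun w => !(pvStopWords.contains w)))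
  let primary := pvPrimaryB keywords full_schema
  if primary.isEmpty then full_schema
  else full_schema.filter (fun p => PySem.Set.contains (pvKeepB primary full_schema) p.1)

-- ===== PRECONDITION & SPEC =====
-- Pre_ excludes (a) association lists with duplicate table names or duplicate keys inside a column
-- dict, which do not represent Python dicts; (b) columns without a 'name' key (A raises KeyError);
-- (c) columns whose 'type' mentions FOREIGN KEY without a '-> ' reference (A raises IndexError when
-- such a table is relevant; for never-relevant tables this is narrower than needed — see claim cites).
def Pre_prune_schema_for_question (question : String) (full_schema : List (String × List (List (String × String)))) : Prop :=
  (full_schema.map Prod.fst).Nodup ∧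
  ∀ p ∈ full_schema, ∀ col ∈ p.2,
    (col.map Prod.fst).Nodup ∧
    "name" ∈ col.map Prod.fst ∧
    ∀ kv ∈ col, kv.1 = "type" → PySem.Str.isIn "FOREIGN KEY" kv.2 = true →
      PySem.Str.isIn "-> " kv.2 = true
instance (question : String) (full_schema : List (String × List (List (String × String)))) : Decidable (Pre_prune_schema_for_question question full_schema) := by
  unfold Pre_prune_schema_for_question; infer_instance

def pvWitness_prune_schema_for_question : String × (List (String × List (List (String × String)))) :=
  ("list user names",
   [("user", [[("name", "id"), ("type", "INTEGER")], [("name", "user_name")]]),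
    ("order", [[("name", "order_id"), ("type", "FOREIGN KEY -> user.id")]])])

def Spec_prune_schema_for_question (question : String) (full_schema : List (String × List (List (String × String)))) (out : List (String × List (List (String × String)))) : Prop := out = prune_schema_for_question_alt question full_schema
instance (question : String) (full_schema : List (String × List (List (String × String)))) (out : List (String × List (List (String × String)))) : Decidable (Spec_prune_schema_for_question question full_schema out) := by unfold Spec_prune_schema_for_question; infer_instance

-- ===== CLAIM (what is proved, stated in full; the proofs are below) =====
def Claim_equal_prune_schema_for_question : Prop := ∀ (question : String) (full_schema : List (String × List (List (String × String)))), Dom_prune_schema_for_question question full_schema → Pre_prune_schema_for_question question full_schema → Spec_prune_schema_for_question question full_schema (prune_schema_for_question question full_schema)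

-- ===== LEMMAS AND PROOFS =====

-- proof-local normal form of the result (the filter/keep shape both ports are reduced to)
def pvKw (q : String) : PySem.Set String :=
  PySem.Set.ofList ((PySem.Str.split₀ (PySem.Str.lower q)).filter (fun w => !(pvStopWords.contains w)))

def pvMatchB (q : String) (p : String × List (List (String × String))) : Bool :=
  !(PySem.Set.inter (pvKw q) (pvTableWordsB p.1 p.2)).isEmpty

def pvMatched (q : String) (fs : List (String × List (List (String × String)))) :
    List (String × List (List (String × String))) :=
  fs.filter (pvMatchB q)

def pvStep (keep : PySem.Set String) (p : String × List (List (String × String))) : PySem.Set String :=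
  pvFkFold (PySem.Set.add keep p.1) p.2

def pvKeep (q : String) (fs : List (String × List (List (String × String)))) : PySem.Set String :=
  (pvMatched q fs).foldl pvStep PySem.Set.empty

def pvOut (q : String) (fs : List (String × List (List (String × String)))) :
    List (String × List (List (String × String))) :=
  if (pvMatched q fs).isEmpty then fs
  else fs.filter (fun p => PySem.Set.contains (pvKeep q fs) p.1)

-- the set union built by repeated `update` has the expected members
theorem pv_mem_foldl_update {β : Type} (l : List β) (g : β → List String) (s : PySem.Set String) (x : String) :
    x ∈ l.foldl (fun s y => PySem.Set.update s (g y)) s ↔ x ∈ s ∨ ∃ y ∈ l, x ∈ g y := by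
  induction l generalizing s with
  | nil => simp
  | cons a l ih =>
    simp only [List.foldl_cons, ih, PySem.Set.mem_update, List.mem_cons]
    constructor
    · rintro ((h | h) | ⟨y, hy, hx⟩)
      · exact Or.inl h
      · exact Or.inr ⟨a, Or.inl rfl, h⟩
      · exact Or.inr ⟨y, Or.inr hy, hx⟩
    · rintro (h | ⟨y, (rfl | hy), hx⟩)
      · exact Or.inl (Or.inl h)
      · exact Or.inl (Or.inr hx)
      · exact Or.inr ⟨y, hy, hx⟩

theorem pv_inter_ne_nil (s t : PySem.Set String) :
    PySem.Set.inter s t ≠ [] ↔ ∃ x ∈ s, x ∈ t := by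
  constructor
  · intro h
    obtain ⟨x, hx⟩ := List.exists_mem_of_ne_nil _ h
    exact ⟨x, (PySem.Set.mem_inter s t x).1 hx⟩
  · rintro ⟨x, hxs, hxt⟩ h
    exact absurd ((PySem.Set.mem_inter s t x).2 ⟨hxs, hxt⟩) (by simp [h])

-- A's weighted score is positive exactly when the combined word set meets the keywords
theorem pv_match_iff (K : PySem.Set String) (t : String) (cols : List (List (String × String))) :
    0 < pvTableScore K t cols ↔ PySem.Set.inter K (pvTableWordsB t cols) ≠ [] := by
  have hT : pvTableScore K t cols =
      ((PySem.Set.inter K (PySem.Set.ofList (pvSplitUnd (PySem.Str.lower t)))).length : Int) * 2 +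
      ((PySem.Set.inter K (List.foldl (fun cw col => PySem.Set.update cw (pvWordsOfName col)) PySem.Set.empty cols)).length : Int) := by
    unfold pvTableScore
    ring
  rw [hT, pv_inter_ne_nil]
  set A := PySem.Set.inter K (PySem.Set.ofList (pvSplitUnd (PySem.Str.lower t))) with hA
  set C := PySem.Set.inter K (List.foldl (fun cw col => PySem.Set.update cw (pvWordsOfName col)) PySem.Set.empty cols) with hC
  constructor
  · intro h
    have hAC : A ≠ [] ∨ C ≠ [] := by
      by_contra hc
      simp only [not_or, not_not] at hc
      obtain ⟨h1, h2⟩ := hc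
      rw [h1, h2] at h
      simp at h
    rcases hAC with h1 | h1
    · rw [hA, pv_inter_ne_nil] at h1
      obtain ⟨x, hxK, hx⟩ := h1
      refine ⟨x, hxK, ?_⟩
      unfold pvTableWordsB
      exact (pv_mem_foldl_update _ _ _ _).2 (Or.inl hx)
    · rw [hC, pv_inter_ne_nil] at h1
      obtain ⟨x, hxK, hx⟩ := h1
      rw [pv_mem_foldl_update] at hx
      rcases hx with hx | hx
      · simp [PySem.Set.empty] at hx
      · refine ⟨x, hxK, ?_⟩
        unfold pvTableWordsB
        exact (pv_mem_foldl_update _ _ _ _).2 (Or.inr hx)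
  · rintro ⟨x, hxK, hxW⟩
    unfold pvTableWordsB at hxW
    rw [pv_mem_foldl_update] at hxW
    have hne : A ≠ [] ∨ C ≠ [] := by
      rcases hxW with hx | hx
      · exact Or.inl ((pv_inter_ne_nil _ _).2 ⟨x, hxK, hx⟩)
      · exact Or.inr ((pv_inter_ne_nil _ _).2 ⟨x, hxK, (pv_mem_foldl_update _ _ _ _).2 (Or.inr hx)⟩)
    have hA0 : (0:Int) ≤ (A.length : Int) := by positivity
    have hC0 : (0:Int) ≤ (C.length : Int) := by positivity
    rcases hne with h1 | h1 <;> have := List.length_pos_of_ne_nil h1 <;> omega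

theorem pv_match_bool (K : PySem.Set String) (t : String) (cols : List (List (String × String))) :
    decide (0 < pvTableScore K t cols) = !(PySem.Set.inter K (pvTableWordsB t cols)).isEmpty := by
  rw [Bool.eq_iff_iff]
  simp [pv_match_iff]

theorem pv_add_of_contains (s : PySem.Set String) (x : String)
    (h : PySem.Set.contains s x = true) : PySem.Set.add s x = s := by
  show (if PySem.Set.contains s x = true then s else s ++ [x]) = s
  rw [if_pos h]

theorem pv_add_of_not_contains (s : PySem.Set String) (x : String)
    (h : PySem.Set.contains s x = false) : PySem.Set.add s x = s ++ [x] := by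
  show (if PySem.Set.contains s x = true then s else s ++ [x]) = s ++ [x]
  rw [if_neg (by rw [h]; simp)]

theorem pv_update_add (s r : PySem.Set String) (x : String) :
    (PySem.Set.add s x).foldl PySem.Set.add r = PySem.Set.add (s.foldl PySem.Set.add r) x := by
  by_cases h : PySem.Set.contains s x = true
  · rw [pv_add_of_contains s x h]
    have hmem : x ∈ s := by simpa [PySem.Set.contains, List.contains_iff_mem] using h
    have hmem' : x ∈ s.foldl PySem.Set.add r := by
      have : x ∈ PySem.Set.update r s := (PySem.Set.mem_update r s x).2 (Or.inr hmem)
      simpa [PySem.Set.update] using this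
    rw [pv_add_of_contains _ x (by simpa [PySem.Set.contains, List.contains_iff_mem] using hmem')]
  · rw [pv_add_of_not_contains s x (by simpa using h), List.foldl_append]
    rfl

theorem pv_foldl_add_foldl (l : List String) (s r : PySem.Set String) :
    (l.foldl PySem.Set.add s).foldl PySem.Set.add r = l.foldl PySem.Set.add (s.foldl PySem.Set.add r) := by
  induction l generalizing s with
  | nil => rfl
  | cons x l ih =>
    simp only [List.foldl_cons]
    rw [ih, pv_update_add]

theorem pv_related_step (fs : List (String × List (List (String × String))))
    (hnd : (fs.map Prod.fst).Nodup) (p : String × List (List (String × String))) (hp : p ∈ fs)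
    (r : PySem.Set String) :
    PySem.Set.update r (get_related_tables p.1 fs) = pvStep r p := by
  have hlook : PySem.Dict.getD (PySem.Dict.mk fs) p.1 [] = p.2 := by
    apply PySem.Dict.getD_of_mem_items
    · show (p.1, p.2) ∈ fs
      simpa using hp
    · exact hnd
  unfold get_related_tables pvStep pvFkFold
  rw [hlook]
  rw [PySem.List.foldl_ite_eq_foldl_filter (p := fun col => pvIsFk col = true),
      PySem.List.foldl_ite_eq_foldl_filter (p := fun col => pvIsFk col = true)]
  rw [← List.foldl_map (f := pvFkRef) (g := PySem.Set.add),
      ← List.foldl_map (f := pvFkRef) (g := PySem.Set.add)]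
  show PySem.Set.update r (((List.filter _ p.2).map pvFkRef).foldl PySem.Set.add (PySem.Set.add PySem.Set.empty p.1)) = _
  unfold PySem.Set.update
  rw [pv_foldl_add_foldl]
  congr 1

-- A's port equals the normal form pvOut (the whole A-side reduction)
theorem pvA_eq_pvOut (question : String) (fs : List (String × List (List (String × String))))
    (hnd : (fs.map Prod.fst).Nodup) :
    prune_schema_for_question question fs = pvOut question fs := by
  have hscores : calculate_table_relevance_scores (extract_keywords_from_question question) fs =
      (pvMatched question fs).foldl
        (fun d tc => PySem.Dict.insert d tc.1
          (pvTableScore (extract_keywords_from_question question) tc.1 tc.2))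
        PySem.Dict.empty := by
    unfold calculate_table_relevance_scores
    rw [PySem.List.foldl_ite_eq_foldl_filter
        (p := fun (tc : String × List (List (String × String))) => 0 < pvTableScore (extract_keywords_from_question question) tc.1 tc.2)
        (f := fun (d : PySem.Dict String Int) (tc : String × List (List (String × String))) => PySem.Dict.insert d tc.1
          (pvTableScore (extract_keywords_from_question question) tc.1 tc.2))]
    have hfilt : fs.filter
        (fun (tc : String × List (List (String × String))) =>
          decide (0 < pvTableScore (extract_keywords_from_question question) tc.1 tc.2)) =
        pvMatched question fs := by
      unfold pvMatched pvMatchB pvKw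
      apply List.filter_congr
      intro p _
      exact pv_match_bool (extract_keywords_from_question question) p.1 p.2
    rw [hfilt]
  have hmnd : ((pvMatched question fs).map Prod.fst).Nodup := by
    apply List.Nodup.sublist _ hnd
    exact List.Sublist.map Prod.fst List.filter_sublist
  have hitems : (calculate_table_relevance_scores (extract_keywords_from_question question) fs).items =
      (pvMatched question fs).map
        (fun tc => (tc.1, pvTableScore (extract_keywords_from_question question) tc.1 tc.2)) := by
    rw [hscores]
    rw [PySem.Dict.items_foldl_insert_fresh (pvMatched question fs) Prod.fst
      (fun tc => pvTableScore (extract_keywords_from_question question) tc.1 tc.2)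
      PySem.Dict.empty (fun a _ => PySem.Dict.contains_empty a.1) hmnd]
    rfl
  have hsize : (calculate_table_relevance_scores (extract_keywords_from_question question) fs).size =
      (pvMatched question fs).length := by
    show (calculate_table_relevance_scores (extract_keywords_from_question question) fs).items.length = _
    rw [hitems, List.length_map]
  by_cases hmm : pvMatched question fs = []
  · have h0 : ((calculate_table_relevance_scores (extract_keywords_from_question question) fs).size == 0) = true := by
      rw [hsize, hmm]
      rfl
    have hout : pvOut question fs = fs := by
      unfold pvOut
      rw [hmm]
      rfl
    unfold prune_schema_for_question
    simp only [h0, if_true, hout]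
  · have h0 : ((calculate_table_relevance_scores (extract_keywords_from_question question) fs).size == 0) = false := by
      rw [hsize]
      simp [hmm]
    have hkeys : (calculate_table_relevance_scores (extract_keywords_from_question question) fs).keys =
        (pvMatched question fs).map Prod.fst := by
      show (calculate_table_relevance_scores (extract_keywords_from_question question) fs).items.map Prod.fst = _
      rw [hitems, List.map_map]
      rfl
    have hrel : (calculate_table_relevance_scores (extract_keywords_from_question question) fs).keys.foldl
        (fun r table => PySem.Set.update r (get_related_tables table fs)) PySem.Set.empty =
        pvKeep question fs := by
      rw [hkeys, List.foldl_map]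
      unfold pvKeep
      apply PySem.List.foldl_congr_mem
      intro r p hp
      exact pv_related_step fs hnd p (List.mem_of_mem_filter hp) r
    have hempty : (pvMatched question fs).isEmpty = false := by simp [hmm]
    unfold prune_schema_for_question
    simp only [h0, Bool.false_eq_true, if_false, hrel]
    rw [PySem.List.foldl_ite_eq_foldl_filter
        (p := fun (p : String × List (List (String × String))) => PySem.Set.contains (pvKeep question fs) p.1 = true)
        (f := fun (d : PySem.Dict String (List (List (String × String)))) (p : String × List (List (String × String))) => PySem.Dict.insert d p.1 p.2)]
    rw [PySem.Dict.items_foldl_insert_fresh _ Prod.fst Prod.snd PySem.Dict.empty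
      (fun a _ => PySem.Dict.contains_empty a.1)
      (by
        apply List.Nodup.sublist _ hnd
        exact List.Sublist.map Prod.fst List.filter_sublist)]
    unfold pvOut
    rw [hempty]
    simp
    rfl

-- ----- B-side: membership characterisation of the inverted index and the sets built from it -----

-- one table's index pass: bucket membership after the inner word loop
theorem pv_idx_inner (ws : List String) (tb : String) (d : PySem.Dict String (List String)) (t w : String) :
    t ∈ PySem.Dict.getD (ws.foldl (fun d w' => PySem.Dict.insert d w' (PySem.Dict.getD d w' [] ++ [tb])) d) w [] ↔
      t ∈ PySem.Dict.getD d w [] ∨ (t = tb ∧ w ∈ ws) := by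
  induction ws generalizing d with
  | nil => simp
  | cons a ws ih =>
    simp only [List.foldl_cons, ih, PySem.Dict.getD_insert, List.mem_cons]
    by_cases h : w = a
    · subst h
      simp
      tauto
    · simp only [if_neg h]
      tauto

-- the whole index: t is in bucket w iff some schema entry named t carries the word w
theorem pv_idx (fs : List (String × List (List (String × String)))) (d : PySem.Dict String (List String)) (t w : String) :
    t ∈ PySem.Dict.getD (fs.foldl pvIndexStep d) w [] ↔
      t ∈ PySem.Dict.getD d w [] ∨ ∃ p ∈ fs, t = p.1 ∧ w ∈ pvTableWordsB p.1 p.2 := by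
  induction fs generalizing d with
  | nil => simp
  | cons p fs ih =>
    simp only [List.foldl_cons, ih, List.mem_cons]
    rw [show pvIndexStep d p = (pvTableWordsB p.1 p.2).foldl
        (fun d w' => PySem.Dict.insert d w' (PySem.Dict.getD d w' [] ++ [p.1])) d from rfl,
      pv_idx_inner]
    constructor
    · rintro ((h | h) | ⟨q, hq, hx⟩)
      · exact Or.inl h
      · exact Or.inr ⟨p, Or.inl rfl, h⟩
      · exact Or.inr ⟨q, Or.inr hq, hx⟩
    · rintro (h | ⟨q, (rfl | hq), hx⟩)
      · exact Or.inl (Or.inl h)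
      · exact Or.inl (Or.inr hx)
      · exact Or.inr ⟨q, hq, hx⟩

-- primary = the tables of the matched entries
theorem pv_mem_primary (q : String) (fs : List (String × List (List (String × String)))) (t : String) :
    t ∈ pvPrimaryB (pvKw q) fs ↔ ∃ p ∈ pvMatched q fs, t = p.1 := by
  unfold pvPrimaryB
  rw [pv_mem_foldl_update (g := fun w => PySem.Dict.getD (pvIndexB fs) w [])]
  simp only [PySem.Set.empty, List.not_mem_nil, false_or]
  unfold pvIndexB
  constructor
  · rintro ⟨w, hw, hm⟩
    rw [pv_idx] at hm
    rcases hm with hm | ⟨p, hp, ht, hword⟩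
    · simp at hm
    · refine ⟨p, ?_, ht⟩
      unfold pvMatched pvMatchB
      rw [List.mem_filter]
      refine ⟨hp, ?_⟩
      simp only [Bool.not_eq_eq_eq_not, Bool.not_true, List.isEmpty_eq_false_iff]
      exact (pv_inter_ne_nil _ _).2 ⟨w, hw, hword⟩
  · rintro ⟨p, hp, ht⟩
    unfold pvMatched pvMatchB at hp
    rw [List.mem_filter] at hp
    obtain ⟨hpfs, hm⟩ := hp
    simp only [Bool.not_eq_eq_eq_not, Bool.not_true, List.isEmpty_eq_false_iff] at hm
    obtain ⟨w, hw, hword⟩ := (pv_inter_ne_nil _ _).1 hm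
    exact ⟨w, hw, (pv_idx fs PySem.Dict.empty t w).2 (Or.inr ⟨p, hpfs, ht, hword⟩)⟩

-- FK inner fold membership
theorem pv_mem_fkFold (cols : List (List (String × String))) (s : PySem.Set String) (t : String) :
    t ∈ pvFkFold s cols ↔ t ∈ s ∨ ∃ c ∈ cols, pvIsFk c = true ∧ t = pvFkRef c := by
  have h1 : pvFkFold s cols =
      PySem.Set.update s ((cols.filter (fun c => pvIsFk c)).map pvFkRef) := by
    unfold pvFkFold
    rw [PySem.List.foldl_ite_eq_foldl_filter (p := fun col => pvIsFk col = true)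
        (f := fun (keep : PySem.Set String) col => PySem.Set.add keep (pvFkRef col))]
    rw [← List.foldl_map (f := pvFkRef) (g := PySem.Set.add)]
    unfold PySem.Set.update
    congr 2
    simp
  rw [h1, PySem.Set.mem_update]
  simp only [List.mem_map, List.mem_filter]
  constructor
  · rintro (hs | ⟨c, ⟨hc, hfk⟩, rfl⟩)
    · exact Or.inl hs
    · exact Or.inr ⟨c, hc, hfk, rfl⟩
  · rintro (hs | ⟨c, hc, hfk, rfl⟩)
    · exact Or.inl hs
    · exact Or.inr ⟨c, ⟨hc, hfk⟩, rfl⟩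

-- A's keep-set membership
theorem pv_mem_foldl_step (l : List (String × List (List (String × String)))) (s : PySem.Set String) (t : String) :
    t ∈ l.foldl pvStep s ↔
      t ∈ s ∨ ∃ p ∈ l, t = p.1 ∨ ∃ c ∈ p.2, pvIsFk c = true ∧ t = pvFkRef c := by
  induction l generalizing s with
  | nil => simp
  | cons p l ih =>
    simp only [List.foldl_cons, ih, List.mem_cons]
    rw [show pvStep s p = pvFkFold (PySem.Set.add s p.1) p.2 from rfl, pv_mem_fkFold]
    simp only [PySem.Set.mem_add]
    constructor
    · rintro (((hs | rfl) | hfk) | ⟨x, hx, hp⟩)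
      · exact Or.inl hs
      · exact Or.inr ⟨p, Or.inl rfl, Or.inl rfl⟩
      · exact Or.inr ⟨p, Or.inl rfl, Or.inr hfk⟩
      · exact Or.inr ⟨x, Or.inr hx, hp⟩
    · rintro (hs | ⟨x, (rfl | hx), hp⟩)
      · exact Or.inl (Or.inl (Or.inl hs))
      · rcases hp with rfl | hfk
        · exact Or.inl (Or.inl (Or.inr rfl))
        · exact Or.inl (Or.inr hfk)
      · exact Or.inr ⟨x, hx, hp⟩

-- B's FK pass over the filtered tables
theorem pv_mem_foldl_fkpairs (l : List (String × List (List (String × String)))) (s : PySem.Set String) (t : String) :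
    t ∈ l.foldl (fun keep p => pvFkFold keep p.2) s ↔
      t ∈ s ∨ ∃ p ∈ l, ∃ c ∈ p.2, pvIsFk c = true ∧ t = pvFkRef c := by
  induction l generalizing s with
  | nil => simp
  | cons p l ih =>
    simp only [List.foldl_cons, ih, pv_mem_fkFold, List.mem_cons]
    constructor
    · rintro ((hs | hfk) | ⟨x, hx, hp⟩)
      · exact Or.inl hs
      · exact Or.inr ⟨p, Or.inl rfl, hfk⟩
      · exact Or.inr ⟨x, Or.inr hx, hp⟩
    · rintro (hs | ⟨x, (rfl | hx), hp⟩)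
      · exact Or.inl (Or.inl hs)
      · exact Or.inl (Or.inr hp)
      · exact Or.inr ⟨x, hx, hp⟩

-- with unique table names, B's `table in primary` filter recovers exactly the matched entries
theorem pv_filter_primary (q : String) (fs : List (String × List (List (String × String))))
    (hnd : (fs.map Prod.fst).Nodup) :
    fs.filter (fun p => PySem.Set.contains (pvPrimaryB (pvKw q) fs) p.1) = pvMatched q fs := by
  unfold pvMatched
  apply List.filter_congr
  intro p hp
  rw [Bool.eq_iff_iff]
  constructor
  · intro h
    have hmem : p.1 ∈ pvPrimaryB (pvKw q) fs := by
      simpa [PySem.Set.contains, List.contains_iff_mem] using h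
    obtain ⟨p', hp', ht⟩ := (pv_mem_primary q fs p.1).1 hmem
    have : p' = p :=
      List.inj_on_of_nodup_map hnd (List.mem_of_mem_filter hp') hp ht.symm
    subst this
    exact (List.mem_filter.1 hp').2
  · intro h
    have : p.1 ∈ pvPrimaryB (pvKw q) fs :=
      (pv_mem_primary q fs p.1).2 ⟨p, List.mem_filter.2 ⟨hp, h⟩, rfl⟩
    simpa [PySem.Set.contains, List.contains_iff_mem] using this

-- the two keep sets agree as sets
theorem pv_keep_ext (q : String) (fs : List (String × List (List (String × String))))
    (hnd : (fs.map Prod.fst).Nodup) (t : String) :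
    t ∈ pvKeepB (pvPrimaryB (pvKw q) fs) fs ↔ t ∈ pvKeep q fs := by
  have hkB : pvKeepB (pvPrimaryB (pvKw q) fs) fs =
      (pvMatched q fs).foldl (fun keep p => pvFkFold keep p.2) (pvPrimaryB (pvKw q) fs) := by
    unfold pvKeepB
    rw [PySem.List.foldl_ite_eq_foldl_filter
      (p := fun (p : String × List (List (String × String))) => PySem.Set.contains (pvPrimaryB (pvKw q) fs) p.1 = true)
      (f := fun (keep : PySem.Set String) (p : String × List (List (String × String))) => pvFkFold keep p.2)]
    rw [show fs.filter (fun p => decide (PySem.Set.contains (pvPrimaryB (pvKw q) fs) p.1 = true)) =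
        fs.filter (fun p => PySem.Set.contains (pvPrimaryB (pvKw q) fs) p.1) by simp,
      pv_filter_primary q fs hnd]
  rw [hkB, pv_mem_foldl_fkpairs]
  unfold pvKeep
  rw [pv_mem_foldl_step]
  rw [pv_mem_primary]
  simp only [PySem.Set.empty, List.not_mem_nil, false_or]
  constructor
  · rintro (⟨p, hp, rfl⟩ | ⟨p, hp, hc⟩)
    · exact ⟨p, hp, Or.inl rfl⟩
    · exact ⟨p, hp, Or.inr hc⟩
  · rintro ⟨p, hp, (rfl | hc)⟩
    · exact Or.inl ⟨p, hp, rfl⟩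
    · exact Or.inr ⟨p, hp, hc⟩

-- emptiness of primary coincides with emptiness of the matched list
theorem pv_primary_empty (q : String) (fs : List (String × List (List (String × String)))) :
    (pvPrimaryB (pvKw q) fs).isEmpty = (pvMatched q fs).isEmpty := by
  rw [Bool.eq_iff_iff]
  simp only [List.isEmpty_iff, List.eq_nil_iff_forall_not_mem]
  constructor
  · intro h p hp
    exact h p.1 ((pv_mem_primary q fs p.1).2 ⟨p, hp, rfl⟩)
  · intro h t ht
    obtain ⟨p, hp, _⟩ := (pv_mem_primary q fs t).1 ht
    exact h p hp

-- B's port equals the normal form pvOut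
theorem pvAlt_eq_pvOut (q : String) (fs : List (String × List (List (String × String))))
    (hnd : (fs.map Prod.fst).Nodup) :
    prune_schema_for_question_alt q fs = pvOut q fs := by
  have halt : prune_schema_for_question_alt q fs =
      (if (pvPrimaryB (pvKw q) fs).isEmpty then fs
       else fs.filter (fun p => PySem.Set.contains (pvKeepB (pvPrimaryB (pvKw q) fs) fs) p.1)) := by
    simp only [prune_schema_for_question_alt]
    rfl
  rw [halt]
  unfold pvOut
  rw [pv_primary_empty]
  by_cases hmm : (pvMatched q fs).isEmpty = true
  · rw [hmm]
    simp
  · rw [Bool.not_eq_true] at hmm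
    rw [hmm]
    simp only [Bool.false_eq_true, if_false]
    apply List.filter_congr
    intro p _
    rw [Bool.eq_iff_iff]
    constructor
    · intro h
      have := (pv_keep_ext q fs hnd p.1).1 (by simpa [PySem.Set.contains, List.contains_iff_mem] using h)
      simpa [PySem.Set.contains, List.contains_iff_mem] using this
    · intro h
      have := (pv_keep_ext q fs hnd p.1).2 (by simpa [PySem.Set.contains, List.contains_iff_mem] using h)
      simpa [PySem.Set.contains, List.contains_iff_mem] using this

-- ===== VERDICT (by name: the statement is the Claim_ definition above) =====
set_option maxHeartbeats 1000000 in
theorem prune_schema_for_question_spec : Claim_equal_prune_schema_for_question := by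
  intro question fs _ hpre
  obtain ⟨hnd, _⟩ := hpre
  unfold Spec_prune_schema_for_question
  rw [pvA_eq_pvOut question fs hnd, pvAlt_eq_pvOut question fs hnd]
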